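-- pv_equiv track=rewrite | github.com/lgd-matlab/guodong.github.io | add_all_images.py | insert_after_line
-- ===== SOURCE A (Python) =====
-- def insert_after_line(lines, search_text, image_md, skip=0):
--     """Insert image markdown after finding search_text"""
--     for i, line in enumerate(lines):
--         if search_text in line:
--             if skip > 0:
--                 skip -= 1
--                 continue
--             lines.insert(i+1, f'\n{image_md}\n\n')
--             return True
--     return False
-- ===== SOURCE B (Python) =====
-- def insert_after_line(lines, search_text, image_md, skip=0):
--     """Insert image markdown after finding search_text"""
--     matches = [i for i, line in enumerate(lines) if search_text in line]
--     k = skip if skip > 0 else 0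
--     if k < len(matches):
--         lines.insert(matches[k] + 1, f'\n{image_md}\n\n')
--         return True
--     return False
-- ===== Notes on version B (the rewrite author's own statement) =====
-- stated objective: alternative
-- what changed: B first builds the full index table of matching lines in one pass, then selects the (skip)-th match and inserts, instead of A's interleaved scan with an in-loop skip countdown and early return.
import Mathlib
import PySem

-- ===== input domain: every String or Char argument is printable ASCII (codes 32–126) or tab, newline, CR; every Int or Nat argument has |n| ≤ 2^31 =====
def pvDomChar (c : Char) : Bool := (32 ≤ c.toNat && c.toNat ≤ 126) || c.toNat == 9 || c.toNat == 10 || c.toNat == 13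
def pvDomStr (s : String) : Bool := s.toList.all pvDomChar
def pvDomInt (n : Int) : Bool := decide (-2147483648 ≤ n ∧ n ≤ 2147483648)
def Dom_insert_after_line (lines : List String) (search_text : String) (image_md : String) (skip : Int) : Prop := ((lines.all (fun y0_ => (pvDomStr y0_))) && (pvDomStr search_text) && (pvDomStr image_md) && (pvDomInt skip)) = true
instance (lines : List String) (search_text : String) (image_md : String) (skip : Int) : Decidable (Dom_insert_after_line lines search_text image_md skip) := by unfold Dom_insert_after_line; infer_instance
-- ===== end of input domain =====

-- B builds the index table of matching lines in one pass, then selects the skip-th match (alternative decomposition, same cost).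
-- Both A and B mutate `lines` in place identically on success; the equivalence proved here is about the RETURN value.
-- ===== PORT A =====
def insertAfterLineLoopA (search_text : String) : List (Int × String) → Int → Bool
  | [], _ => false
  | (_, line) :: rest, skip =>
    if PySem.Str.isIn search_text line then
      if skip > 0 then insertAfterLineLoopA search_text rest (skip - 1)
      else true
    else insertAfterLineLoopA search_text rest skip

def insert_after_line (lines : List String) (search_text : String) (_image_md : String) (skip : Int) : Bool :=
  insertAfterLineLoopA search_text (PySem.List.enumerate lines) skip

-- ===== PORT B =====
def insert_after_line_alt (lines : List String) (search_text : String) (_image_md : String) (skip : Int) : Bool :=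
  let hits := (PySem.List.enumerate lines).filter (fun p => PySem.Str.isIn search_text p.2)
  let k : Int := if skip > 0 then skip else 0
  if k < (hits.length : Int) then true else false

-- ===== PRECONDITION & SPEC =====
def Spec_insert_after_line (lines : List String) (search_text : String) (image_md : String) (skip : Int) (out : Bool) : Prop := out = insert_after_line_alt lines search_text image_md skip
instance (lines : List String) (search_text : String) (image_md : String) (skip : Int) (out : Bool) : Decidable (Spec_insert_after_line lines search_text image_md skip out) := by unfold Spec_insert_after_line; infer_instance

-- ===== CLAIM (what is proved, stated in full; the proofs are below) =====
def Claim_equal_insert_after_line : Prop := ∀ (lines : List String) (search_text : String) (image_md : String) (skip : Int), Dom_insert_after_line lines search_text image_md skip → Spec_insert_after_line lines search_text image_md skip (insert_after_line lines search_text image_md skip)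

-- ===== LEMMAS AND PROOFS =====

theorem loopA_eq_filter (st : String) (ps : List (Int × String)) :
    ∀ skip : Int, insertAfterLineLoopA st ps skip =
      decide ((if skip > 0 then skip else 0) < ((ps.filter (fun p => PySem.Str.isIn st p.2)).length : Int)) := by
  induction ps with
  | nil =>
    intro skip
    simp only [insertAfterLineLoopA, List.filter_nil, List.length_nil]
    symm
    rw [decide_eq_false_iff_not]
    split <;> omega
  | cons p ps ih =>
    intro skip
    rcases p with ⟨i, line⟩
    by_cases h : PySem.Str.isIn st line = true
    · simp only [insertAfterLineLoopA, List.filter_cons, h, if_true, List.length_cons]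
      by_cases hs : skip > 0
      · rw [if_pos hs, ih (skip - 1), decide_eq_decide]
        push_cast
        split_ifs <;> omega
      · rw [if_neg hs]
        symm
        rw [decide_eq_true_iff]
        push_cast
        split_ifs <;> omega
    · simp only [insertAfterLineLoopA, List.filter_cons, h, Bool.false_eq_true, if_false]
      exact ih skip

theorem alt_eq_decide (lines : List String) (st md : String) (skip : Int) :
    insert_after_line_alt lines st md skip =
      decide ((if skip > 0 then skip else 0) <
        (((PySem.List.enumerate lines).filter (fun p => PySem.Str.isIn st p.2)).length : Int)) := by
  unfold insert_after_line_alt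
  by_cases h : ((if skip > 0 then skip else 0 : Int) <
      (((PySem.List.enumerate lines).filter (fun p => PySem.Str.isIn st p.2)).length : Int)) <;>
    simp [h]

-- ===== VERDICT (by name: the statement is the Claim_ definition above) =====
theorem insert_after_line_spec : Claim_equal_insert_after_line := by
  intro lines st md skip _
  unfold Spec_insert_after_line insert_after_line
  rw [loopA_eq_filter, alt_eq_decide]
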